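-- pv_equiv track=rewrite | github.com/jhimil-1/New_product_search | product_handler.py | _is_valid_objectid
-- ===== SOURCE A (Python) =====
-- def _is_valid_objectid(user_id: str) -> bool:
--     """Check if user_id is a valid MongoDB ObjectId format"""
--     if not user_id or len(user_id) != 24:
--         return False
--     try:
--         int(user_id, 16)  # Check if it's a valid hex string
--         return all(c in '0123456789abcdefABCDEF' for c in user_id)
--     except ValueError:
--         return False
-- ===== SOURCE B (Python) =====
-- import re
--
-- _OBJECTID_RE = re.compile(r'[0-9a-fA-F]{24}')
--
-- def _is_valid_objectid(user_id: str) -> bool: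
--     """Check if user_id is a valid MongoDB ObjectId format"""
--     if not user_id or len(user_id) != 24:
--         return False
--     return _OBJECTID_RE.fullmatch(user_id) is not None
-- ===== Notes on version B (the rewrite author's own statement) =====
-- stated objective: idiomatic
-- what changed: Replaces the int(user_id,16) parse-and-discard plus per-character membership scan over a 22-char alphabet string with a length guard followed by a single regex fullmatch of [0-9a-fA-F]{24}.
import Mathlib
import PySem

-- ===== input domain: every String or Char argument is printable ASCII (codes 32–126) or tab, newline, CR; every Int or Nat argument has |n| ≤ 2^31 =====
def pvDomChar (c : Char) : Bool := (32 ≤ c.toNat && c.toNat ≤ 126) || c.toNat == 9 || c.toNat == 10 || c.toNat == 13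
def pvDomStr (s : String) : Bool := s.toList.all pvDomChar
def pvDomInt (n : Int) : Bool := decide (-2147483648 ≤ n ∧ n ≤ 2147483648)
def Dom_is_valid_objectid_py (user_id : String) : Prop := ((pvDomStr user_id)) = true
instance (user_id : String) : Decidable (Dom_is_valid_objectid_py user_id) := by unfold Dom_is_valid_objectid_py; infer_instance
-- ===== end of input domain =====

-- B re-implements the ObjectId check as a single regex-style fullmatch of [0-9a-fA-F]{24} after the
-- length guard (idiomatic; not claimed faster).  `int(user_id, 16)` is ported BY HAND below
-- (pvInt16?): a step-for-step transliteration of CPython's base-16 int() grammar (surrounding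
-- whitespace, optional sign, optional 0x/0X prefix, hex digits with single underscores between
-- digits); it computes the same value as PySem.Int.ofStrBase? · 16 (whose internals are private and
-- cannot be reasoned about by name) and is exact on the stated ASCII domain.

-- ===== PORT A =====
-- hand port of int(s, 16): is c a base-16 digit?
def pvHexDigitOk (c : Char) : Bool :=
  match PySem.Int.digitVal? c with
  | some d => decide (d < 16)
  | none => false

-- hand port of int(s, 16): digit scanner (afterDigit = "previous char was a digit", acc = value so far)
def pvHexGo : List Char → Bool → Nat → Option Nat
  | [], afterDigit, acc => if afterDigit then some acc else none
  | c :: rest, afterDigit, acc =>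
    if pvHexDigitOk c then pvHexGo rest true (acc * 16 + (PySem.Int.digitVal? c).getD 0)
    else if c = '_' ∧ afterDigit then
      match rest with
      | d :: _ => if pvHexDigitOk d then pvHexGo rest false acc else none
      | [] => none
    else none

def pvHexDigitsVal? (cs : List Char) : Option Nat :=
  match cs with
  | [] => none
  | _ => pvHexGo cs false 0

-- hand port of int(s, 16) (none = ValueError), exact on the ASCII domain
def pvInt16? (s : String) : Option Int :=
  let cs := ((s.toList.dropWhile PySem.Int.isIntSpace).reverse.dropWhile PySem.Int.isIntSpace).reverse
  let neg : Bool := cs.head? = some '-'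
  let cs2 := if cs.head? = some '-' ∨ cs.head? = some '+' then cs.tail else cs
  let usePfx : Bool := cs2.head? = some '0' ∧ (cs2.tail.head? = some 'x' ∨ cs2.tail.head? = some 'X')
  let ds :=
    if usePfx then
      match cs2.drop 2 with
      | '_' :: d :: r => if pvHexDigitOk d then d :: r else '_' :: d :: r
      | r => r
    else cs2
  match pvHexDigitsVal? ds with
  | none => none
  | some n => some (if neg then -(n : Int) else (n : Int))

def is_valid_objectid_py (user_id : String) : Bool :=
  if user_id.toList = [] ∨ PySem.Str.len user_id ≠ 24 then false
  else
    match pvInt16? user_id with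
    | none => false
    | some _ => user_id.toList.all (fun c => "0123456789abcdefABCDEF".toList.contains c)

-- ===== PORT B =====
-- regex character class [0-9a-fA-F]
def pvHexClass (c : Char) : Bool :=
  (48 ≤ c.toNat && c.toNat ≤ 57) || (97 ≤ c.toNat && c.toNat ≤ 102) || (65 ≤ c.toNat && c.toNat ≤ 70)

-- fullmatch of the regex [0-9a-fA-F]{n}: exactly n class characters and then the end
def pvFullmatchHex : Nat → List Char → Bool
  | 0, [] => true
  | 0, _ :: _ => false
  | _ + 1, [] => false
  | n + 1, c :: cs => pvHexClass c && pvFullmatchHex n cs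

def is_valid_objectid_py_alt (user_id : String) : Bool :=
  if user_id.toList = [] ∨ PySem.Str.len user_id ≠ 24 then false
  else pvFullmatchHex 24 user_id.toList

-- ===== PRECONDITION & SPEC =====
def Spec_is_valid_objectid_py (user_id : String) (out : Bool) : Prop := out = is_valid_objectid_py_alt user_id
instance (user_id : String) (out : Bool) : Decidable (Spec_is_valid_objectid_py user_id out) := by unfold Spec_is_valid_objectid_py; infer_instance

-- ===== CLAIM (what is proved, stated in full; the proofs are below) =====
def Claim_equal_is_valid_objectid_py : Prop := ∀ (user_id : String), Dom_is_valid_objectid_py user_id → Spec_is_valid_objectid_py user_id (is_valid_objectid_py user_id)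

-- ===== LEMMAS AND PROOFS =====

-- characters: c = d iff their codepoints agree
theorem pv_char_eq_iff_toNat (c d : Char) : (c = d) ↔ c.toNat = d.toNat := by
  constructor
  · rintro rfl; rfl
  · intro h; exact Char.ext (UInt32.toNat_inj.mp h)

theorem pv_char_le_iff (c d : Char) : (c ≤ d) ↔ c.toNat ≤ d.toNat := by
  rw [Char.le_def]; exact UInt32.le_iff_toNat_le

theorem pv_isDigit_iff (c : Char) : c.isDigit = true ↔ 48 ≤ c.toNat ∧ c.toNat ≤ 57 := by
  simp [Char.isDigit, ge_iff_le, UInt32.le_iff_toNat_le]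

-- membership in A's literal hex alphabet is B's regex character class
set_option maxRecDepth 4000 in
theorem pv_contains_eq_hexClass (c : Char) :
    ("0123456789abcdefABCDEF".toList.contains c) = pvHexClass c := by
  have hl : "0123456789abcdefABCDEF".toList =
      ['0','1','2','3','4','5','6','7','8','9','a','b','c','d','e','f','A','B','C','D','E','F'] := rfl
  rw [Bool.eq_iff_iff, hl]
  simp only [List.contains_eq_mem, List.mem_cons, List.not_mem_nil, or_false,
    pvHexClass, Bool.or_eq_true, Bool.and_eq_true, decide_eq_true_eq]
  simp only [pv_char_eq_iff_toNat, show Char.toNat '0' = 48 from rfl, show Char.toNat '1' = 49 from rfl, show Char.toNat '2' = 50 from rfl, show Char.toNat '3' = 51 from rfl, show Char.toNat '4' = 52 from rfl, show Char.toNat '5' = 53 from rfl, show Char.toNat '6' = 54 from rfl, show Char.toNat '7' = 55 from rfl, show Char.toNat '8' = 56 from rfl, show Char.toNat '9' = 57 from rfl, show Char.toNat 'a' = 97 from rfl, show Char.toNat 'b' = 98 from rfl, show Char.toNat 'c' = 99 from rfl, show Char.toNat 'd' = 100 from rfl, show Char.toNat 'e' = 101 from rfl, show Char.toNat 'f' =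 102 from rfl, show Char.toNat 'A' = 65 from rfl, show Char.toNat 'B' = 66 from rfl, show Char.toNat 'C' = 67 from rfl, show Char.toNat 'D' = 68 from rfl, show Char.toNat 'E' = 69 from rfl, show Char.toNat 'F' = 70 from rfl]
  omega

theorem pv_hex_digitOk (c : Char) (h : pvHexClass c = true) : pvHexDigitOk c = true := by
  simp only [pvHexClass, Bool.or_eq_true, Bool.and_eq_true, decide_eq_true_eq] at h
  have hd := pv_isDigit_iff c
  simp only [pvHexDigitOk, PySem.Int.digitVal?, pv_char_le_iff,
    show Char.toNat 'a' = 97 from rfl, show Char.toNat 'z' = 122 from rfl,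
    show Char.toNat 'A' = 65 from rfl, show Char.toNat 'Z' = 90 from rfl]
  split_ifs with h1 h2 h3 <;> simp_all <;> omega

theorem pv_hex_not_space (c : Char) (h : pvHexClass c = true) : PySem.Int.isIntSpace c = false := by
  simp only [pvHexClass, Bool.or_eq_true, Bool.and_eq_true, decide_eq_true_eq] at h
  simp only [PySem.Int.isIntSpace, Bool.or_eq_false_iff, decide_eq_false_iff_not, pv_char_eq_iff_toNat,
    show Char.toNat ' ' = 32 from rfl, show Char.toNat '\t' = 9 from rfl,
    show Char.toNat '\n' = 10 from rfl, show Char.toNat '\x0d' = 13 from rfl,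
    show Char.toNat '\x0b' = 11 from rfl, show Char.toNat '\x0c' = 12 from rfl]
  omega

-- hex-class characters are none of '-', '+', 'x', 'X'
theorem pv_hex_ne (c : Char) (h : pvHexClass c = true) (d : Char)
    (hd : d.toNat = 45 ∨ d.toNat = 43 ∨ d.toNat = 120 ∨ d.toNat = 88) : c ≠ d := by
  simp only [pvHexClass, Bool.or_eq_true, Bool.and_eq_true, decide_eq_true_eq] at h
  intro hcd
  rw [pv_char_eq_iff_toNat] at hcd
  omega

theorem pv_all_tail {p : Char → Bool} (xs : List Char) (h : xs.all p = true) : xs.tail.all p = true := by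
  cases xs <;> simp_all

theorem pv_dropWhile_hex (xs : List Char) (h : xs.all pvHexClass = true) :
    xs.dropWhile PySem.Int.isIntSpace = xs := by
  cases xs with
  | nil => rfl
  | cons c r =>
    simp only [List.all_cons, Bool.and_eq_true] at h
    simp [pv_hex_not_space c h.1]

theorem pv_go_some (cs : List Char) : ∀ (ad : Bool) (acc : Nat),
    cs.all pvHexClass = true → cs ≠ [] → ∃ m, pvHexGo cs ad acc = some m := by
  induction cs with
  | nil => intro _ _ _ hne; exact absurd rfl hne
  | cons c r ih =>
    intro ad acc h _
    simp only [List.all_cons, Bool.and_eq_true] at h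
    rw [pvHexGo.eq_def]
    simp only [if_pos (pv_hex_digitOk c h.1)]
    cases r with
    | nil => exact ⟨acc * 16 + (PySem.Int.digitVal? c).getD 0, rfl⟩
    | cons d t => exact ih true (acc * 16 + (PySem.Int.digitVal? c).getD 0) h.2 (by simp)

theorem pv_head?_ne_of_hex (r : List Char) (h : r.all pvHexClass = true) (d : Char)
    (hd : d.toNat = 45 ∨ d.toNat = 43 ∨ d.toNat = 120 ∨ d.toNat = 88) : r.head? ≠ some d := by
  cases r with
  | nil => simp
  | cons c t =>
    simp only [List.all_cons, Bool.and_eq_true] at h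
    simp [pv_hex_ne c h.1 d hd]

theorem pv_int16_some (s : String) (h : s.toList.all pvHexClass = true) (hne : s.toList ≠ []) :
    ∃ n, pvInt16? s = some n := by
  have hrev : s.toList.reverse.all pvHexClass = true := by
    simpa using h
  have h1 : s.toList.dropWhile PySem.Int.isIntSpace = s.toList := pv_dropWhile_hex _ h
  have h2 : s.toList.reverse.dropWhile PySem.Int.isIntSpace = s.toList.reverse := pv_dropWhile_hex _ hrev
  have hm : s.toList.head? ≠ some '-' := pv_head?_ne_of_hex _ h '-' (Or.inl rfl)
  have hp : s.toList.head? ≠ some '+' := pv_head?_ne_of_hex _ h '+' (Or.inr (Or.inl rfl))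
  have hx : s.toList.tail.head? ≠ some 'x' :=
    pv_head?_ne_of_hex _ (pv_all_tail _ h) 'x' (Or.inr (Or.inr (Or.inl rfl)))
  have hX : s.toList.tail.head? ≠ some 'X' :=
    pv_head?_ne_of_hex _ (pv_all_tail _ h) 'X' (Or.inr (Or.inr (Or.inr rfl)))
  obtain ⟨m, hgo⟩ := pv_go_some s.toList false 0 h hne
  simp only [pvInt16?, h1, h2, List.reverse_reverse, hm, hp]
  simp only [hx, hX, or_self, and_false, decide_false, Bool.false_eq_true, if_false]
  obtain ⟨c, r, hcr⟩ := List.exists_cons_of_ne_nil hne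
  rw [hcr] at hgo ⊢
  refine ⟨(m : Int), ?_⟩
  simp [pvHexDigitsVal?, hgo]

theorem pv_full_eq (cs : List Char) : ∀ n, pvFullmatchHex n cs = (decide (cs.length = n) && cs.all pvHexClass) := by
  induction cs with
  | nil => intro n; cases n <;> simp [pvFullmatchHex]
  | cons c r ih =>
    intro n
    cases n with
    | zero => simp [pvFullmatchHex]
    | succ k => simp [pvFullmatchHex, ih k, Bool.and_comm, Bool.and_assoc]

theorem pv_mem_all_eq (cs : List Char) :
    cs.all (fun c => "0123456789abcdefABCDEF".toList.contains c) = cs.all pvHexClass := by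
  induction cs with
  | nil => rfl
  | cons c r _ => simp only [List.all_cons, pv_contains_eq_hexClass]


-- ===== VERDICT (by name: the statement is the Claim_ definition above) =====
theorem is_valid_objectid_py_spec : Claim_equal_is_valid_objectid_py := by
  intro s _
  unfold Spec_is_valid_objectid_py is_valid_objectid_py is_valid_objectid_py_alt
  by_cases hg : s.toList = [] ∨ PySem.Str.len s ≠ 24
  · rw [if_pos hg, if_pos hg]
  · rw [if_neg hg, if_neg hg]
    rw [not_or, not_not] at hg
    have hne : s.toList ≠ [] := hg.1
    have hlen : s.toList.length = 24 := by
      have := hg.2; rw [PySem.Str.len_eq] at this; exact_mod_cast this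
    by_cases hall : s.toList.all pvHexClass = true
    · obtain ⟨n, hp⟩ := pv_int16_some s hall hne
      rw [hp, pv_full_eq, hlen, pv_mem_all_eq, hall]
      simp
    · rw [pv_full_eq, hlen]
      simp only [decide_true, Bool.true_and]
      rw [Bool.not_eq_true] at hall
      rw [hall]
      cases hq : pvInt16? s with
      | none => rfl
      | some n => rw [pv_mem_all_eq, hall]
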